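-- pv_equiv track=rewrite | github.com/Junha7777/Online-Judge | Python/백준/Gold/1062. 가르침/가르침.py | solution
-- ===== SOURCE A (Python) =====
-- from itertools import combinations
--
-- def solution(N, K, words):
--     if K < 5:
--         return 0
--
--     basic = {'a', 'n', 't', 'i', 'c'}
--
--     alpha = set()
--     for word in words:
--         for c in word:
--             alpha.add(c)
--     alpha = alpha - basic
--
--     candidates = []
--     for c in combinations(alpha, min(len(alpha), K-5)):
--         learned = basic | set(c)
--
--         count = 0
--         for word in words:
--             can_read = True
--             for char in word:
--                 if char not in learned:
--                     can_read = False
--                     break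
--             if can_read:
--                 count += 1
--         candidates.append(count)
--
--     return max(candidates) if candidates else 0
-- ===== SOURCE B (Python) =====
-- from itertools import combinations
--
-- def solution(N, K, words):
--     if K < 5:
--         return 0
--     basic = {'a', 'n', 't', 'i', 'c'}
--     seen = {}
--     for w in words:
--         for ch in w:
--             if ch not in basic:
--                 seen[ch] = True
--     alpha = list(seen)
--     bit = {ch: 1 << i for i, ch in enumerate(alpha)}
--     masks = []
--     for w in words:
--         m = 0
--         for ch in w:
--             if ch not in basic:
--                 m |= bit[ch]
--         masks.append(m)
--     best = 0
--     for comb in combinations(alpha, min(len(alpha), K - 5)):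
--         chosen = 0
--         for ch in comb:
--             chosen |= bit[ch]
--         cnt = 0
--         for m in masks:
--             if m & chosen == m:
--                 cnt += 1
--         if cnt > best:
--             best = cnt
--     return best
-- ===== Notes on version B (the rewrite author's own statement) =====
-- stated objective: alternative
-- what changed: B precomputes one integer bitmask of needed non-basic letters per word and tests readability of a word against a combination with a single AND, replacing A's per-combination learned-set construction and per-character set-membership scan over every word.
import Mathlib
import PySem

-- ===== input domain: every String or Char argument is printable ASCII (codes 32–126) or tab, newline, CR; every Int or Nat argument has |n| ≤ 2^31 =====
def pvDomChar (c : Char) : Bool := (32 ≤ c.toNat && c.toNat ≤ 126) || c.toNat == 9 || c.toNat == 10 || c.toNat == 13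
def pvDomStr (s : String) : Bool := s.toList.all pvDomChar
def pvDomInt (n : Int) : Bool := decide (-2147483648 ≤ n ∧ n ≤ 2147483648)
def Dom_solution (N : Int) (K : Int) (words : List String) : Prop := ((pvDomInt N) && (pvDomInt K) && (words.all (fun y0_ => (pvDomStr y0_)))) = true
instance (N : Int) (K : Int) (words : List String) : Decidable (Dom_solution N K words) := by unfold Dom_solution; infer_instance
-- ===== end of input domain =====

-- B replaces A's per-combination learned-set construction and per-character membership scans
-- by precomputed per-word letter bitmasks tested with one AND per (combination, word) pair
-- (objective: alternative algorithm; the max over combinations is order-independent, so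
-- Python's set iteration order in A does not affect the result).

-- ===== PORT A =====
def aBasic : PySem.Set Char := PySem.Set.ofList ['a', 'n', 't', 'i', 'c']

-- the inner word loop with its `break`
def aCanRead (learned : PySem.Set Char) : List Char → Bool
  | [] => true
  | ch :: rest => if learned.contains ch then aCanRead learned rest else false

def solution (N : Int) (K : Int) (words : List String) : Int :=
  if K < 5 then 0 else
    let basic := aBasic
    let alpha0 : PySem.Set Char :=
      words.foldl (fun s word => word.toList.foldl (fun s c => PySem.Set.add s c) s) PySem.Set.empty
    let alpha : PySem.Set Char := alpha0.diff basic
    let candidates : List Int :=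
      (PySem.List.combinations alpha (min (PySem.Set.len alpha) (K - 5)).toNat).foldl
        (fun acc c =>
          let learned := basic.union c
          let count : Int :=
            words.foldl (fun count word => if aCanRead learned word.toList then count + 1 else count) 0
          acc ++ [count]) []
    match PySem.List.max? candidates (fun x => x) with
    | some m => m
    | none => 0

-- ===== PORT B =====
def bBasic : PySem.Set Char := PySem.Set.ofList ['a', 'n', 't', 'i', 'c']

def solution_alt (N : Int) (K : Int) (words : List String) : Int :=
  if K < 5 then 0 else
    let seen : PySem.Dict Char Bool :=
      words.foldl (fun d w => w.toList.foldl (fun d ch =>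
        if bBasic.contains ch then d else d.insert ch true) d) PySem.Dict.empty
    let alpha : List Char := seen.keys
    -- bit = {ch: 1 << i for i, ch in enumerate(alpha)}; masks stay Nat (Python values here are ≥ 0)
    let bit : PySem.Dict Char Nat :=
      alpha.zipIdx.foldl (fun d p => d.insert p.1 (1 <<< p.2)) PySem.Dict.empty
    -- bit[ch] ported as getD ch 0: every non-basic character of a word is a key of bit
    let masks : List Nat :=
      words.foldl (fun masks w =>
        masks ++ [w.toList.foldl (fun m ch =>
          if bBasic.contains ch then m else m ||| bit.getD ch 0) 0]) []
    (PySem.List.combinations alpha (min ((alpha.length : Int)) (K - 5)).toNat).foldl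
      (fun best c =>
        let chosen : Nat := c.foldl (fun chosen ch => chosen ||| bit.getD ch 0) 0
        let cnt : Int := masks.foldl (fun cnt m => if m &&& chosen == m then cnt + 1 else cnt) 0
        if cnt > best then cnt else best) 0

-- ===== PRECONDITION & SPEC =====
def Spec_solution (N : Int) (K : Int) (words : List String) (out : Int) : Prop := out = solution_alt N K words
instance (N : Int) (K : Int) (words : List String) (out : Int) : Decidable (Spec_solution N K words out) := by unfold Spec_solution; infer_instance

-- ===== CLAIM (what is proved, stated in full; the proofs are below) =====
def Claim_equal_solution : Prop := ∀ (N : Int) (K : Int) (words : List String), Dom_solution N K words → Spec_solution N K words (solution N K words)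

-- ===== LEMMAS AND PROOFS =====

-- the multiset of characters of all words, in order
def wchars (words : List String) : List Char := words.flatMap (·.toList)

-- the distinct non-basic characters, in first-occurrence order
def alphaOf (words : List String) : List Char :=
  PySem.Set.ofList ((wchars words).filter (fun ch => !aBasic.contains ch))

-- number of words readable from basic ∪ c
def readCount (words : List String) (c : List Char) : Int :=
  (words.countP (fun w => w.toList.all (fun ch => aBasic.contains ch || c.contains ch)) : Int)

-- common value of both programs (K ≥ 5)
def bestOf (words : List String) (r : Nat) : Int :=
  (PySem.List.combinations (alphaOf words) r).foldl (fun best c => max best (readCount words c)) 0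

-- B's bit dictionary, word mask and combination mask, as closed terms
def bitOf (words : List String) : PySem.Dict Char Nat :=
  (alphaOf words).zipIdx.foldl (fun d p => d.insert p.1 (1 <<< p.2)) PySem.Dict.empty
def maskOf (words : List String) (w : String) : Nat :=
  (w.toList.filter (fun ch => !aBasic.contains ch)).foldl (fun m ch => m ||| (bitOf words).getD ch 0) 0
def chosenOf (words : List String) (c : List Char) : Nat :=
  c.foldl (fun a ch => a ||| (bitOf words).getD ch 0) 0

lemma ofList_filter (p : Char → Bool) (l : List Char) :
    (PySem.Set.ofList l).filter p = PySem.Set.ofList (l.filter p) := by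
  induction l using List.reverseRecOn with
  | nil => rfl
  | append_singleton xs x ih =>
    rw [PySem.Set.ofList_append_singleton, List.filter_append, PySem.Set.add_eq_ite]
    by_cases hx : x ∈ PySem.Set.ofList xs
    · rw [if_pos hx]
      cases hp : p x
      · simp [hp, ih]
      · have hx' : x ∈ xs.filter p :=
          List.mem_filter.mpr ⟨(PySem.Set.mem_ofList _ _).mp hx, hp⟩
        simp only [List.filter_cons, hp, if_pos, List.filter_nil]
        rw [PySem.Set.ofList_append_singleton,
          PySem.Set.add_of_mem ((PySem.Set.mem_ofList _ _).mpr hx')]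
        exact ih
    · rw [if_neg hx]
      cases hp : p x
      · simp [hp, ih]
      · have hx' : x ∉ xs.filter p := fun h => hx ((PySem.Set.mem_ofList _ _).mpr (List.mem_filter.mp h).1)
        simp only [List.filter_cons, hp, if_pos, List.filter_nil]
        rw [PySem.Set.ofList_append_singleton,
          PySem.Set.add_of_not_mem (fun h => hx' ((PySem.Set.mem_ofList _ _).mp h)),
          List.filter_append, ih]
        simp [hp]

lemma foldl_if_not {α δ : Type} (p : α → Bool) (f : δ → α → δ) (l : List α) (init : δ) :
    l.foldl (fun acc x => if p x then acc else f acc x) init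
      = (l.filter (fun x => !p x)).foldl f init := by
  rw [← PySem.List.foldl_if_eq_foldl_filter (fun x => !p x) f]
  apply PySem.List.foldl_congr_mem
  intro acc x _
  cases hp : p x <;> simp

lemma testBit_foldl_or {α : Type} (l : List α) (g : α → Nat) (init : Nat) (k : Nat) :
    (l.foldl (fun a x => a ||| g x) init).testBit k
      = (init.testBit k || l.any (fun x => (g x).testBit k)) := by
  induction l generalizing init with
  | nil => simp
  | cons x xs ih => simp [ih, Nat.testBit_or, Bool.or_assoc]

lemma nat_land_eq_self_iff (m n : Nat) :
    m &&& n = m ↔ ∀ k, m.testBit k = true → n.testBit k = true := by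
  constructor
  · intro h k hk
    have h2 := congrArg (fun z => Nat.testBit z k) h
    simp only [Nat.testBit_land, hk, Bool.true_and] at h2
    exact h2
  · intro h
    apply Nat.eq_of_testBit_eq
    intro k
    rw [Nat.testBit_land]
    cases hm : m.testBit k
    · simp
    · simp [h k hm]

lemma combinations_ne_nil {α : Type} (l : List α) (r : Nat) (h : r ≤ l.length) :
    PySem.List.combinations l r ≠ [] := by
  intro he
  have hm : l.take r ∈ PySem.List.combinations l r :=
    (PySem.List.mem_combinations_iff _ _ _).mpr
      ⟨List.take_sublist _ _, by simp [List.length_take, Nat.min_eq_left h]⟩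
  simp [he] at hm

lemma aCanRead_eq_all (s : PySem.Set Char) (l : List Char) :
    aCanRead s l = l.all s.contains := by
  induction l with
  | nil => rfl
  | cons ch rest ih =>
    simp only [aCanRead, List.all_cons]
    cases h : PySem.Set.contains s ch <;> simp [ih]

lemma max_match (f : List Char → Int) (combs : List (List Char)) (hne : combs ≠ [])
    (hpos : ∀ c ∈ combs, 0 ≤ f c) :
    (match PySem.List.max? (combs.map f) (fun x => x) with | some m => m | none => 0)
      = combs.foldl (fun b c => max b (f c)) 0 := by
  cases combs with
  | nil => exact absurd rfl hne
  | cons c0 rest =>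
    simp only [List.map_cons]
    rw [PySem.List.max?_id_cons]
    simp only [List.foldl_cons]
    rw [List.foldl_map, max_eq_right (hpos c0 (by simp))]

lemma bit_getD (words : List String) (ch : Char) (h : ch ∈ alphaOf words) :
    (bitOf words).getD ch 0 = 2 ^ ((alphaOf words).idxOf ch) := by
  have hitems : (bitOf words).items
      = (alphaOf words).zipIdx.map (fun p => (p.1, 1 <<< p.2)) := by
    have := PySem.Dict.items_foldl_insert_fresh ((alphaOf words).zipIdx)
      Prod.fst (fun p => 1 <<< p.2) PySem.Dict.empty
      (fun a _ => by simp [PySem.Dict.contains_empty])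
      (by rw [List.zipIdx_map_fst]; exact PySem.Set.nodup_ofList _)
    simpa [bitOf] using this
  have hkeysnd : (bitOf words).keys.Nodup := by
    simp only [PySem.Dict.keys, hitems, List.map_map]
    simp only [Function.comp_def]
    have h2 : ((alphaOf words).zipIdx.map fun x : Char × Nat => x.1) = alphaOf words :=
      List.zipIdx_map_fst 0 _
    rw [h2]
    exact PySem.Set.nodup_ofList _
  have hlt : (alphaOf words).idxOf ch < (alphaOf words).length :=
    List.idxOf_lt_length_of_mem h
  have hmemz : ((alphaOf words)[(alphaOf words).idxOf ch], (alphaOf words).idxOf ch)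
      ∈ (alphaOf words).zipIdx :=
    List.mem_zipIdx_iff_getElem?.mpr (by simp [hlt])
  rw [List.getElem_idxOf hlt] at hmemz
  have hmem : (ch, 1 <<< (alphaOf words).idxOf ch) ∈ (bitOf words).items := by
    rw [hitems]
    exact List.mem_map.mpr ⟨_, hmemz, rfl⟩
  rw [PySem.Dict.getD_of_mem_items _ hmem hkeysnd, Nat.shiftLeft_eq, one_mul]

lemma idxOf_inj_alpha (words : List String) {x y : Char}
    (hx : x ∈ alphaOf words) (hy : y ∈ alphaOf words)
    (h : (alphaOf words).idxOf x = (alphaOf words).idxOf y) : x = y := by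
  have hx' := List.getElem_idxOf (List.idxOf_lt_length_of_mem hx)
  have hy' := List.getElem_idxOf (List.idxOf_lt_length_of_mem hy)
  rw [← hx', ← hy']
  congr 1

lemma mem_alpha_of_wchar (words : List String) (w : String) (hw : w ∈ words) (ch : Char)
    (hch : ch ∈ w.toList) (hb : aBasic.contains ch = false) : ch ∈ alphaOf words := by
  apply (PySem.Set.mem_ofList _ _).mpr
  exact List.mem_filter.mpr ⟨List.mem_flatMap.mpr ⟨w, hw, hch⟩, by rw [hb]; rfl⟩

lemma testBit_chosen (words : List String) (c : List Char) (k : Nat) :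
    (chosenOf words c).testBit k = c.any (fun ch => ((bitOf words).getD ch 0).testBit k) := by
  rw [chosenOf, testBit_foldl_or]
  simp

lemma testBit_mask (words : List String) (w : String) (k : Nat) :
    (maskOf words w).testBit k
      = (w.toList.filter (fun ch => !aBasic.contains ch)).any
          (fun ch => ((bitOf words).getD ch 0).testBit k) := by
  rw [maskOf, testBit_foldl_or]
  simp

lemma word_test (words : List String) (c : List Char) (hc : c ⊆ alphaOf words)
    (w : String) (hw : w ∈ words) :
    (maskOf words w &&& chosenOf words c == maskOf words w)
      = w.toList.all (fun ch => aBasic.contains ch || c.contains ch) := by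
  rw [Bool.eq_iff_iff, beq_iff_eq, nat_land_eq_self_iff, List.all_eq_true]
  constructor
  · intro h ch hch
    cases hb : aBasic.contains ch
    · have hcha : ch ∈ alphaOf words := mem_alpha_of_wchar words w hw ch hch hb
      have hmk : (maskOf words w).testBit ((alphaOf words).idxOf ch) = true := by
        rw [testBit_mask]
        apply List.any_eq_true.mpr
        refine ⟨ch, List.mem_filter.mpr ⟨hch, by rw [hb]; rfl⟩, ?_⟩
        rw [bit_getD words ch hcha, Nat.testBit_two_pow]
        simp
      have hcs := h _ hmk
      rw [testBit_chosen] at hcs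
      obtain ⟨x, hxc, hxk⟩ := List.any_eq_true.mp hcs
      have hxa : x ∈ alphaOf words := hc hxc
      rw [bit_getD words x hxa, Nat.testBit_two_pow] at hxk
      have : x = ch := idxOf_inj_alpha words hxa hcha (by simpa using hxk)
      subst this
      simp [hxc]
    · simp
  · intro h k hk
    rw [testBit_mask] at hk
    obtain ⟨ch, hchf, hchk⟩ := List.any_eq_true.mp hk
    obtain ⟨hch, hb⟩ := List.mem_filter.mp hchf
    have hb' : aBasic.contains ch = false := by simpa using hb
    have hcha : ch ∈ alphaOf words := mem_alpha_of_wchar words w hw ch hch hb'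
    have hcc : ch ∈ c := by
      have := h ch hch
      rw [hb'] at this
      simpa using this
    rw [testBit_chosen]
    exact List.any_eq_true.mpr ⟨ch, hcc, hchk⟩

lemma A_eq (N K : Int) (words : List String) (hK : ¬ K < 5) :
    solution N K words = bestOf words (min ((alphaOf words).length : Int) (K - 5)).toNat := by
  unfold solution
  rw [if_neg hK]
  have h0 : words.foldl (fun s word => word.toList.foldl (fun s c => PySem.Set.add s c) s) PySem.Set.empty
      = PySem.Set.ofList (wchars words) := by
    rw [PySem.Set.ofList_eq_foldl, wchars, List.foldl_flatMap]
    rfl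
  have halpha : (PySem.Set.ofList (wchars words)).diff aBasic = alphaOf words := by
    show List.filter _ _ = _
    rw [ofList_filter]
    rfl
  rw [h0]
  dsimp only
  rw [halpha]
  have hlen : PySem.Set.len (alphaOf words) = ((alphaOf words).length : Int) := rfl
  rw [hlen]
  set r : Nat := (min ((alphaOf words).length : Int) (K - 5)).toNat with hr
  have hcount : ∀ c : List Char,
      (words.foldl (fun count word => if aCanRead (aBasic.union c) word.toList then count + 1 else count) 0)
        = readCount words c := by
    intro c
    rw [PySem.List.foldl_if_add_one]
    simp only [readCount, zero_add]
    congr 1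
    apply List.countP_congr
    intro w _
    rw [aCanRead_eq_all]
    have hch : ∀ ch : Char,
        ((aBasic.union c).contains ch = true) ↔ ((aBasic.contains ch || c.contains ch) = true) := by
      intro ch
      simp [PySem.Set.mem_union]
    simp only [List.all_eq_true]
    exact forall_congr' fun ch => imp_congr Iff.rfl (hch ch)
  have hrle : r ≤ (alphaOf words).length := by
    rw [hr]; omega
  have hne : PySem.List.combinations (alphaOf words) r ≠ [] := combinations_ne_nil _ _ hrle
  have hpos : ∀ c ∈ PySem.List.combinations (alphaOf words) r, 0 ≤ readCount words c := by
    intro c _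
    exact Int.natCast_nonneg _
  rw [PySem.List.foldl_append_singleton_eq_map, List.nil_append]
  have hfeq : (fun c : List Char =>
      List.foldl (fun count word => if aCanRead (aBasic.union c) word.toList = true then count + 1 else count) 0 words)
        = fun c => readCount words c := funext hcount
  rw [hfeq, max_match (readCount words) _ hne hpos]
  rfl

lemma B_eq (N K : Int) (words : List String) (hK : ¬ K < 5) :
    solution_alt N K words = bestOf words (min ((alphaOf words).length : Int) (K - 5)).toNat := by
  unfold solution_alt
  rw [if_neg hK]
  dsimp only
  have hbb : bBasic = aBasic := rfl
  rw [hbb]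
  have hseen : (words.foldl (fun d w => w.toList.foldl (fun d ch =>
        if aBasic.contains ch then d else d.insert ch true) d) PySem.Dict.empty).keys
      = alphaOf words := by
    rw [← List.foldl_flatMap,
      foldl_if_not (fun ch => aBasic.contains ch) (fun (d : PySem.Dict Char Bool) ch => d.insert ch true),
      PySem.Dict.keys_foldl_insert (f := fun _ _ => true),
      PySem.Dict.keys_empty, PySem.Set.update_nil_left]
    rfl
  rw [hseen]
  have hmasks : (words.foldl (fun masks w =>
        masks ++ [w.toList.foldl (fun m ch =>
          if aBasic.contains ch then m else m ||| ((alphaOf words).zipIdx.foldl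
            (fun d p => d.insert p.1 (1 <<< p.2)) PySem.Dict.empty).getD ch 0) 0]) [])
      = words.map (maskOf words) := by
    rw [PySem.List.foldl_append_singleton_eq_map, List.nil_append]
    apply List.map_congr_left
    intro w _
    rw [foldl_if_not (fun ch => aBasic.contains ch)]
    rfl
  rw [hmasks]
  apply PySem.List.foldl_congr_mem
  intro best c hcmem
  have hc : c ⊆ alphaOf words := (PySem.List.sublist_of_mem_combinations hcmem).subset
  have hcnt : ((words.map (maskOf words)).foldl (fun cnt m =>
      if m &&& chosenOf words c == m then cnt + 1 else cnt) 0) = readCount words c := by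
    rw [PySem.List.foldl_if_add_one, zero_add]
    simp only [List.countP_map]
    rw [readCount]
    congr 1
    apply List.countP_congr
    intro w hw
    simp only [Function.comp_apply]
    rw [word_test words c hc w hw]
  rw [show (c.foldl (fun chosen ch => chosen ||| ((alphaOf words).zipIdx.foldl
      (fun d p => d.insert p.1 (1 <<< p.2)) PySem.Dict.empty).getD ch 0) 0) = chosenOf words c from rfl]
  rw [hcnt]
  by_cases h : readCount words c ≤ best
  · rw [if_neg (not_lt.mpr h), max_eq_left h]
  · rw [if_pos (lt_of_not_ge h), max_eq_right (le_of_not_ge h)]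

-- ===== VERDICT (by name: the statement is the Claim_ definition above) =====
theorem solution_spec : Claim_equal_solution := by
  intro N K words _
  unfold Spec_solution
  by_cases hK : K < 5
  · simp [solution, solution_alt, hK]
  · rw [A_eq N K words hK, B_eq N K words hK]
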